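-- pv_equiv track=rewrite | github.com/Quant-link/QLK-Contract-Quard | web/backend/analyzers/huggingface_analyzer.py | _generate_technical_analysis
-- ===== SOURCE A (Python) =====
-- def _generate_technical_analysis(content: str, language: str) -> str:
--     """Generate detailed technical analysis"""
--     analysis_points = []
--
--     # Code complexity analysis
--     lines = content.splitlines()
--     complexity_score = len([l for l in lines if any(keyword in l for keyword in ['if', 'for', 'while', 'require', 'assert'])])
--     analysis_points.append(f"Cyclomatic complexity: {complexity_score}")
--
--     # Security pattern detection
--     security_patterns = {
--         'external_calls': len([l for l in lines if '.call(' in l or '.send(' in l or '.transfer(' in l]),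
--         'state_changes': len([l for l in lines if '=' in l and any(var in l for var in ['balance', 'owner', 'state'])]),
--         'access_modifiers': len([l for l in lines if any(mod in l for mod in ['onlyOwner', 'onlyAdmin', 'require(msg.sender'])]),
--         'reentrancy_guards': len([l for l in lines if 'nonReentrant' in l or 'ReentrancyGuard' in l])
--     }
--
--     for pattern, count in security_patterns.items():
--         analysis_points.append(f"{pattern.replace('_', ' ').title()}: {count} instances")
--
--     # Gas optimization opportunities
--     gas_issues = len([l for l in lines if any(issue in l for issue in ['storage', 'memory', 'calldata', 'view', 'pure'])])
--     analysis_points.append(f"Gas optimization opportunities: {gas_issues}")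
--
--     return "; ".join(analysis_points)
-- ===== SOURCE B (Python) =====
-- def _generate_technical_analysis(content: str, language: str) -> str:
--     """Single pass over the lines with six counters; build the report at the end."""
--     complexity = external = state = access = reentrancy = gas = 0
--     for l in content.splitlines():
--         if 'if' in l or 'for' in l or 'while' in l or 'require' in l or 'assert' in l:
--             complexity += 1
--         if '.call(' in l or '.send(' in l or '.transfer(' in l:
--             external += 1
--         if '=' in l and ('balance' in l or 'owner' in l or 'state' in l):
--             state += 1
--         if 'onlyOwner' in l or 'onlyAdmin' in l or 'require(msg.sender' in l:
--             access += 1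
--         if 'nonReentrant' in l or 'ReentrancyGuard' in l:
--             reentrancy += 1
--         if 'storage' in l or 'memory' in l or 'calldata' in l or 'view' in l or 'pure' in l:
--             gas += 1
--     return (
--         f"Cyclomatic complexity: {complexity}; "
--         f"External Calls: {external} instances; "
--         f"State Changes: {state} instances; "
--         f"Access Modifiers: {access} instances; "
--         f"Reentrancy Guards: {reentrancy} instances; "
--         f"Gas optimization opportunities: {gas}"
--     )
-- ===== Notes on version B (the rewrite author's own statement) =====
-- stated objective: simpler
-- what changed: Replaces A's six separate list-comprehension passes, the intermediate dict of security patterns and the title()-formatting of its keys with a single fold over the lines maintaining six counters, and builds the final report directly as one string with fixed labels.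
import Mathlib
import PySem

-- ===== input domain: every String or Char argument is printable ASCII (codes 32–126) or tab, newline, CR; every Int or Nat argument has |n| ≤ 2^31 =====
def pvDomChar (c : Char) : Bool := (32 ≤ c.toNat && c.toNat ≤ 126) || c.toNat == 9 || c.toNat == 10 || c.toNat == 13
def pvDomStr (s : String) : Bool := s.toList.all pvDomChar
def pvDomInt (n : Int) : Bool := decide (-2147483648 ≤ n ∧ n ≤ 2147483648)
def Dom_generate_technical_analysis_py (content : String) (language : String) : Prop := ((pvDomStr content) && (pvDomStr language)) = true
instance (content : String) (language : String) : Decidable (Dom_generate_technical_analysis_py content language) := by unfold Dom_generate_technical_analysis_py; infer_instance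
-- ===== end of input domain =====

-- B fuses A's six independent line-comprehensions into ONE pass over the lines with six
-- counters and builds the report string directly (objective: simpler/alternative, same predicates).

-- ===== PORT A =====
-- str.title() for the ASCII domain: an alpha char is uppercased after a non-alpha char,
-- lowercased after an alpha char (exact for ASCII; Python's 'cased' = alpha there).
def pyTitleGo (prevAlpha : Bool) : List Char → List Char
  | [] => []
  | c :: cs =>
      let isAl := c.isAlpha
      (if isAl then (if prevAlpha then c.toLower else c.toUpper) else c) :: pyTitleGo isAl cs

def pyTitle (s : String) : String := String.ofList (pyTitleGo false s.toList)

def generate_technical_analysis_py (content : String) (language : String) : String :=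
  let lines := PySem.Str.splitlines content
  let complexity_score : Nat :=
    (lines.filter (fun l =>
      (["if", "for", "while", "require", "assert"].any (fun keyword => PySem.Str.isIn keyword l)))).length
  let analysis_points : List String :=
    [] ++ ["Cyclomatic complexity: " ++ PySem.Int.toStr complexity_score]
  let security_patterns : PySem.Dict String Nat := PySem.Dict.mk
    [ ("external_calls",
        (lines.filter (fun l => PySem.Str.isIn ".call(" l || PySem.Str.isIn ".send(" l || PySem.Str.isIn ".transfer(" l)).length),
      ("state_changes",
        (lines.filter (fun l => PySem.Str.isIn "=" l &&
          (["balance", "owner", "state"].any (fun v => PySem.Str.isIn v l)))).length),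
      ("access_modifiers",
        (lines.filter (fun l =>
          (["onlyOwner", "onlyAdmin", "require(msg.sender"].any (fun m => PySem.Str.isIn m l)))).length),
      ("reentrancy_guards",
        (lines.filter (fun l => PySem.Str.isIn "nonReentrant" l || PySem.Str.isIn "ReentrancyGuard" l)).length) ]
  let analysis_points := security_patterns.items.foldl
    (fun pts pc =>
      pts ++ [pyTitle (PySem.Str.replace pc.1 "_" " ") ++ ": " ++ PySem.Int.toStr pc.2 ++ " instances"])
    analysis_points
  let gas_issues : Nat :=
    (lines.filter (fun l =>
      (["storage", "memory", "calldata", "view", "pure"].any (fun issue => PySem.Str.isIn issue l)))).length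
  let analysis_points := analysis_points ++ ["Gas optimization opportunities: " ++ PySem.Int.toStr gas_issues]
  PySem.Str.join "; " analysis_points

-- ===== PORT B =====
def bStep (st : Nat × Nat × Nat × Nat × Nat × Nat) (l : String) : Nat × Nat × Nat × Nat × Nat × Nat :=
  let (c, e, s, a, r, g) := st
  let c := if PySem.Str.isIn "if" l || PySem.Str.isIn "for" l || PySem.Str.isIn "while" l ||
              PySem.Str.isIn "require" l || PySem.Str.isIn "assert" l then c + 1 else c
  let e := if PySem.Str.isIn ".call(" l || PySem.Str.isIn ".send(" l || PySem.Str.isIn ".transfer(" l then e + 1 else e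
  let s := if PySem.Str.isIn "=" l &&
              (PySem.Str.isIn "balance" l || PySem.Str.isIn "owner" l || PySem.Str.isIn "state" l) then s + 1 else s
  let a := if PySem.Str.isIn "onlyOwner" l || PySem.Str.isIn "onlyAdmin" l ||
              PySem.Str.isIn "require(msg.sender" l then a + 1 else a
  let r := if PySem.Str.isIn "nonReentrant" l || PySem.Str.isIn "ReentrancyGuard" l then r + 1 else r
  let g := if PySem.Str.isIn "storage" l || PySem.Str.isIn "memory" l || PySem.Str.isIn "calldata" l ||
              PySem.Str.isIn "view" l || PySem.Str.isIn "pure" l then g + 1 else g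
  (c, e, s, a, r, g)

def generate_technical_analysis_py_alt (content : String) (language : String) : String :=
  let (c, e, s, a, r, g) := (PySem.Str.splitlines content).foldl bStep (0, 0, 0, 0, 0, 0)
  "Cyclomatic complexity: " ++ PySem.Int.toStr c ++
  "; External Calls: " ++ PySem.Int.toStr e ++ " instances" ++
  "; State Changes: " ++ PySem.Int.toStr s ++ " instances" ++
  "; Access Modifiers: " ++ PySem.Int.toStr a ++ " instances" ++
  "; Reentrancy Guards: " ++ PySem.Int.toStr r ++ " instances" ++
  "; Gas optimization opportunities: " ++ PySem.Int.toStr g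

-- ===== PRECONDITION & SPEC =====
def Spec_generate_technical_analysis_py (content : String) (language : String) (out : String) : Prop := out = generate_technical_analysis_py_alt content language
instance (content : String) (language : String) (out : String) : Decidable (Spec_generate_technical_analysis_py content language out) := by unfold Spec_generate_technical_analysis_py; infer_instance

-- ===== CLAIM (what is proved, stated in full; the proofs are below) =====
def Claim_equal_generate_technical_analysis_py : Prop := ∀ (content : String) (language : String), Dom_generate_technical_analysis_py content language → Spec_generate_technical_analysis_py content language (generate_technical_analysis_py content language)

-- ===== LEMMAS AND PROOFS =====
theorem bStep_foldl (ls : List String) (c e s a r g : Nat) :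
    ls.foldl bStep (c, e, s, a, r, g) =
      (c + ls.countP (fun l =>
        PySem.Str.isIn "if" l || PySem.Str.isIn "for" l || PySem.Str.isIn "while" l ||
        PySem.Str.isIn "require" l || PySem.Str.isIn "assert" l),
       e + ls.countP (fun l =>
        PySem.Str.isIn ".call(" l || PySem.Str.isIn ".send(" l || PySem.Str.isIn ".transfer(" l),
       s + ls.countP (fun l => PySem.Str.isIn "=" l &&
        (PySem.Str.isIn "balance" l || PySem.Str.isIn "owner" l || PySem.Str.isIn "state" l)),
       a + ls.countP (fun l =>
        PySem.Str.isIn "onlyOwner" l || PySem.Str.isIn "onlyAdmin" l ||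
        PySem.Str.isIn "require(msg.sender" l),
       r + ls.countP (fun l => PySem.Str.isIn "nonReentrant" l || PySem.Str.isIn "ReentrancyGuard" l),
       g + ls.countP (fun l =>
        PySem.Str.isIn "storage" l || PySem.Str.isIn "memory" l || PySem.Str.isIn "calldata" l ||
        PySem.Str.isIn "view" l || PySem.Str.isIn "pure" l)) := by
  induction ls generalizing c e s a r g with
  | nil => simp
  | cons x xs ih =>
      simp only [List.foldl_cons, List.countP_cons, bStep, ih, Prod.mk.injEq]
      refine ⟨?_, ?_, ?_, ?_, ?_, ?_⟩ <;> split_ifs <;> omega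

-- ===== VERDICT (by name: the statement is the Claim_ definition above) =====
theorem generate_technical_analysis_py_spec : Claim_equal_generate_technical_analysis_py := by
  intro content language _
  unfold Spec_generate_technical_analysis_py generate_technical_analysis_py generate_technical_analysis_py_alt
  rw [bStep_foldl]
  have h1 : pyTitle (PySem.Str.replace "external_calls" "_" " ") = "External Calls" := by decide
  have h2 : pyTitle (PySem.Str.replace "state_changes" "_" " ") = "State Changes" := by decide
  have h3 : pyTitle (PySem.Str.replace "access_modifiers" "_" " ") = "Access Modifiers" := by decide
  have h4 : pyTitle (PySem.Str.replace "reentrancy_guards" "_" " ") = "Reentrancy Guards" := by decide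
  simp only [List.foldl_cons, List.foldl_nil,
    List.nil_append, h1, h2, h3, h4, ← List.countP_eq_length_filter]
  apply String.toList_inj.mp
  simp [PySem.Str.join, PySem.Chars.join_cons_cons, PySem.Chars.join_singleton,
    List.any_cons, List.any_nil, Bool.or_assoc, Bool.or_false]
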